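-- pv_equiv track=rewrite | github.com/xuewenz/MathThinkinginCS | RSA.py | DecipherSmallPrime
-- ===== SOURCE A (Python) =====
-- def PowMod(a, n, mod):
--     if n == 0:
--         return 1 % mod
--     elif n == 1:
--         return a % mod
--     else:
--         b = PowMod(a, n // 2, mod)
--         b = b * b % mod
--         if n % 2 == 0:
--           return b
--         else:
--           return b * a % mod
--
-- def ConvertToStr(n):
--     res = ""
--     while n > 0:
--         res += chr(n % 256)
--         n //= 256
--     return res[::-1]
--
-- def ExtendedEuclid(a, b):
--     if b == 0:
--         return (1, 0)
--     (x, y) = ExtendedEuclid(b, a % b)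
--     k = a // b
--     return (y, x - k * y)
--
-- def InvertModulo(a, n):
--     (b, x) = ExtendedEuclid(a, n)
--     if b < 0:
--         b = (b % n + n) % n
--     return b
--
-- def Decrypt(ciphertext, p, q, exponent):
--   n = (p-1) * (q-1)
--   #ed congruent 1 mod n
--   d = InvertModulo(exponent ,n)
--   modulo = p * q
--   dmsg = PowMod(ciphertext, d, modulo)
--   return ConvertToStr(dmsg)
--
-- def DecipherSmallPrime(ciphertext, modulo, exponent):
--   for num in range(2,1000000):
--     for i in range(2, num):
--       if(num % i) == 0:
--         break
--       else:
--         if modulo % num == 0: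
--           small_prime = num
--           big_prime = modulo // num
--           return Decrypt(ciphertext, small_prime, big_prime, exponent)
--
--   return "don't know"
-- ===== SOURCE B (Python) =====
-- # B: same result via restructured machinery — flat odd-candidate search instead of
-- # A's nested prime scan, iterative extended Euclid, iterative square-and-multiply
-- # PowMod, and ConvertToStr built by prepending (no final reversal).
-- # A returns at the first odd num >= 3 dividing modulo (its inner scan reaches the
-- # modulo test at i = 2 for every odd num, and even num >= 4 break immediately),
-- # so a single loop over 3, 5, 7, ... reproduces A exactly.
--
-- def PowMod(a, n, mod):
--     result = 1 % mod
--     base = a % mod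
--     e = n
--     while e > 0:
--         if e % 2 == 1:
--             result = result * base % mod
--         base = base * base % mod
--         e //= 2
--     return result
--
-- def ConvertToStr(n):
--     res = ""
--     while n > 0:
--         res = chr(n % 256) + res
--         n //= 256
--     return res
--
-- def InvertModulo(a, n):
--     old_r, r = a, n
--     old_s, s = 1, 0
--     while r != 0:
--         q = old_r // r
--         old_r, r = r, old_r - q * r
--         old_s, s = s, old_s - q * s
--     if old_s < 0:
--         old_s = (old_s % n + n) % n
--     return old_s
--
-- def Decrypt(ciphertext, p, q, exponent):
--     n = (p - 1) * (q - 1)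
--     d = InvertModulo(exponent, n)
--     modulo = p * q
--     return ConvertToStr(PowMod(ciphertext, d, modulo))
--
-- def DecipherSmallPrime(ciphertext, modulo, exponent):
--     num = 3
--     while num < 1000000:
--         if modulo % num == 0:
--             return Decrypt(ciphertext, num, modulo // num, exponent)
--         num += 2
--     return "don't know"
-- ===== Notes on version B (the rewrite author's own statement) =====
-- stated objective: alternative
-- what changed: The nested search (every num from 2 with a full inner trial-division scan) becomes a single flat loop over odd candidates 3,5,7,... -- A returns at the first odd num >= 3 dividing modulo, since its inner scan reaches the modulo test already at i=2 for odd num and even num break immediately -- and the number-theory helpers are restructured: iterative square-and-multiply PowMod instead of recursion, iterative extended Euclid with coefficient accumulators instead of the recursive one, and ConvertToStr built by prepending characters instead of append-then-reverse. …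
-- outside the precondition, e.g. on DecipherSmallPrime(5, 0, 3): A raises ZeroDivisionError, B raises ZeroDivisionError; on DecipherSmallPrime(5, -9, 1): A raises RecursionError, B returns ''; on DecipherSmallPrime(5, -9, 4): A returns '', B returns ''
import Mathlib
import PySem

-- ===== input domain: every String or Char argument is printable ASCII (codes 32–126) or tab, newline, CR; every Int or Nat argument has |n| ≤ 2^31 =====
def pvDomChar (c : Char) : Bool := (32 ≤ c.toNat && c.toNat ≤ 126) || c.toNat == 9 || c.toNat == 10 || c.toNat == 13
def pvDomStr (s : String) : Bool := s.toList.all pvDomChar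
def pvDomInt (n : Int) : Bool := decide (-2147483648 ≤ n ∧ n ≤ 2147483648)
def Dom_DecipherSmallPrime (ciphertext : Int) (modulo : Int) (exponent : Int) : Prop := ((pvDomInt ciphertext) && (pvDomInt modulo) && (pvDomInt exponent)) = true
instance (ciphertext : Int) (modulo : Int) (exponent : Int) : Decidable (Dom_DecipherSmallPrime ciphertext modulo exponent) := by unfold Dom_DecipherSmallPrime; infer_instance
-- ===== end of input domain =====

-- B replaces A's nested search (every num from 2, full inner trial-division scan) by one
-- flat loop over odd candidates 3, 5, 7, …, and restructures the helpers: iterative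
-- square-and-multiply PowMod, iterative extended Euclid, ConvertToStr by prepending.

-- ===== PORT A =====
-- PowMod(a, n, mod); Python recurses forever for n < 0, which never happens on the
-- inputs Pre_ admits (the exponent d passed here is always ≥ 0); the n ≤ 0 guard only
-- makes the same computation total and equals Python's n == 0 branch at n = 0.
def pyPowMod (a n mod : Int) : Int :=
  if _h : n ≤ 0 then PySem.Int.mod 1 mod
  else if n = 1 then PySem.Int.mod a mod
  else
    let b := pyPowMod a (PySem.Int.floordiv n 2) mod
    let b2 := PySem.Int.mod (b * b) mod
    if PySem.Int.mod n 2 = 0 then b2 else PySem.Int.mod (b2 * a) mod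
termination_by n.toNat
decreasing_by
  rw [PySem.Int.floordiv_eq_ediv_of_pos (by omega)]
  omega

-- ConvertToStr's while-loop, accumulating res; chr(n % 256) is Char.ofNat of a code in [0,256)
def pyConvertToStrLoop (n : Int) (res : List Char) : List Char :=
  if _h : n > 0 then
    pyConvertToStrLoop (PySem.Int.floordiv n 256) (res ++ [Char.ofNat (PySem.Int.mod n 256).toNat])
  else res
termination_by n.toNat
decreasing_by
  rw [PySem.Int.floordiv_eq_ediv_of_pos (by omega)]
  omega

-- res[::-1] is reverse; res is kept as a List Char
def pyConvertToStr (n : Int) : String := String.ofList (pyConvertToStrLoop n []).reverse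

def pyExtendedEuclid (a b : Int) : Int × Int :=
  if _h : b = 0 then (1, 0)
  else
    let p := pyExtendedEuclid b (PySem.Int.mod a b)
    let k := PySem.Int.floordiv a b
    (p.2, p.1 - k * p.2)
termination_by b.natAbs
decreasing_by
  rcases lt_or_gt_of_ne _h with hb | hb
  · have h1 := PySem.Int.mod_neg_bounds a hb
    omega
  · have h1 := PySem.Int.mod_nonneg a hb
    have h2 := PySem.Int.mod_lt a hb
    omega

def pyInvertModulo (a n : Int) : Int :=
  let p := pyExtendedEuclid a n
  if p.1 < 0 then PySem.Int.mod (PySem.Int.mod p.1 n + n) n else p.1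

def pyDecrypt (ciphertext p q exponent : Int) : String :=
  let n := (p - 1) * (q - 1)
  let d := pyInvertModulo exponent n
  let modulo := p * q
  let dmsg := pyPowMod ciphertext d modulo
  pyConvertToStr dmsg

-- A's inner loop 'for i in range(2, num): …' (break / return / continue)
def aInner (ciphertext modulo exponent num : Int) : List Int → Option String
  | [] => none
  | i :: is =>
    if PySem.Int.mod num i = 0 then none
    else if PySem.Int.mod modulo num = 0 then
      some (pyDecrypt ciphertext num (PySem.Int.floordiv modulo num) exponent)
    else aInner ciphertext modulo exponent num is

-- A's outer loop 'for num in range(2, 1000000): …'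
def aOuter (ciphertext modulo exponent : Int) : List Int → String
  | [] => "don't know"
  | num :: nums =>
    match aInner ciphertext modulo exponent num (PySem.List.pyRange 2 num 1) with
    | some s => s
    | none => aOuter ciphertext modulo exponent nums

def DecipherSmallPrime (ciphertext : Int) (modulo : Int) (exponent : Int) : String :=
  aOuter ciphertext modulo exponent (PySem.List.pyRange 2 1000000 1)

-- ===== PORT B =====
-- B's PowMod: 'while e > 0: if e % 2 == 1: result = result*base%mod; base = base*base%mod; e //= 2'
def bPowLoop (mod result base e : Int) : Int :=
  if _h : e > 0 then
    bPowLoop mod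
      (if PySem.Int.mod e 2 = 1 then PySem.Int.mod (result * base) mod else result)
      (PySem.Int.mod (base * base) mod)
      (PySem.Int.floordiv e 2)
  else result
termination_by e.toNat
decreasing_by
  rw [PySem.Int.floordiv_eq_ediv_of_pos (by omega)]
  omega

def bPowMod (a n mod : Int) : Int :=
  bPowLoop mod (PySem.Int.mod 1 mod) (PySem.Int.mod a mod) n

-- B's ConvertToStr: 'while n > 0: res = chr(n % 256) + res; n //= 256'
def bConvLoop (n : Int) (res : List Char) : List Char :=
  if _h : n > 0 then
    bConvLoop (PySem.Int.floordiv n 256) (Char.ofNat (PySem.Int.mod n 256).toNat :: res)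
  else res
termination_by n.toNat
decreasing_by
  rw [PySem.Int.floordiv_eq_ediv_of_pos (by omega)]
  omega

def bConvertToStr (n : Int) : String := String.ofList (bConvLoop n [])

-- old_r - q*r = mod old_r r: used by bInvLoop's termination proof
theorem bInv_step_natAbs_lt (old_r r : Int) (h : ¬ r = 0) :
    (old_r - PySem.Int.floordiv old_r r * r).natAbs < r.natAbs := by
  have hfm := PySem.Int.floordiv_mul_add_mod old_r r
  rcases lt_or_gt_of_ne h with hr | hr
  · have h1 := PySem.Int.mod_neg_bounds old_r hr
    omega
  · have h1 := PySem.Int.mod_nonneg old_r hr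
    have h2 := PySem.Int.mod_lt old_r hr
    omega

-- B's InvertModulo: iterative extended Euclid tracking only the first Bézout coefficient
def bInvLoop (old_r r old_s s : Int) : Int :=
  if _h : r ≠ 0 then
    let q := PySem.Int.floordiv old_r r
    bInvLoop r (old_r - q * r) s (old_s - q * s)
  else old_s
termination_by r.natAbs
decreasing_by exact bInv_step_natAbs_lt old_r r _h

def bInvertModulo (a n : Int) : Int :=
  let b := bInvLoop a n 1 0
  if b < 0 then PySem.Int.mod (PySem.Int.mod b n + n) n else b

def bDecrypt (ciphertext p q exponent : Int) : String :=
  let n := (p - 1) * (q - 1)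
  let d := bInvertModulo exponent n
  let modulo := p * q
  bConvertToStr (bPowMod ciphertext d modulo)

-- B's search: 'num = 3; while num < 1000000: …; num += 2'
def bSearch (ciphertext modulo exponent num : Int) : String :=
  if _h : num < 1000000 then
    if PySem.Int.mod modulo num = 0 then
      bDecrypt ciphertext num (PySem.Int.floordiv modulo num) exponent
    else bSearch ciphertext modulo exponent (num + 2)
  else "don't know"
termination_by (1000000 - num).toNat
decreasing_by omega

def DecipherSmallPrime_alt (ciphertext : Int) (modulo : Int) (exponent : Int) : String :=
  bSearch ciphertext modulo exponent 3

-- ===== PRECONDITION & SPEC =====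
-- Pre_ restricts to modulo ≥ 1, the natural RSA domain: at modulo = 0 Python A raises
-- ZeroDivisionError, and for negative modulo A raises RecursionError whenever the
-- inverse comes out negative (PowMod recurses forever on a negative exponent), so a
-- non-positive modulus lies outside the function's domain.
def Pre_DecipherSmallPrime (ciphertext : Int) (modulo : Int) (exponent : Int) : Prop :=
  1 ≤ modulo
instance (ciphertext : Int) (modulo : Int) (exponent : Int) : Decidable (Pre_DecipherSmallPrime ciphertext modulo exponent) := by unfold Pre_DecipherSmallPrime; infer_instance

def pvWitness_DecipherSmallPrime : Int × Int × Int := (0, 9, 1)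

def Spec_DecipherSmallPrime (ciphertext : Int) (modulo : Int) (exponent : Int) (out : String) : Prop := out = DecipherSmallPrime_alt ciphertext modulo exponent
instance (ciphertext : Int) (modulo : Int) (exponent : Int) (out : String) : Decidable (Spec_DecipherSmallPrime ciphertext modulo exponent out) := by unfold Spec_DecipherSmallPrime; infer_instance

-- ===== CLAIM (what is proved, stated in full; the proofs are below) =====
def Claim_equal_DecipherSmallPrime : Prop := ∀ (ciphertext : Int) (modulo : Int) (exponent : Int), Dom_DecipherSmallPrime ciphertext modulo exponent → Pre_DecipherSmallPrime ciphertext modulo exponent → Spec_DecipherSmallPrime ciphertext modulo exponent (DecipherSmallPrime ciphertext modulo exponent)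

-- ===== LEMMAS AND PROOFS =====

-- (x % m) * ((y % m)^k) reduces mod m like x * y^k
theorem mulpow_emod (m x y : Int) (k : Nat) :
    (x % m * (y % m) ^ k) % m = (x * y ^ k) % m :=
  Int.ModEq.mul (Int.emod_emod_of_dvd x dvd_rfl) (Int.ModEq.pow k (Int.emod_emod_of_dvd y dvd_rfl))

theorem sq_emod (m r : Int) : r % m * (r % m) % m = r * r % m :=
  Int.ModEq.mul (Int.emod_emod_of_dvd r dvd_rfl) (Int.emod_emod_of_dvd r dvd_rfl)

theorem emod_mul_emod_left (m x a : Int) : x % m * a % m = x * a % m :=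
  Int.ModEq.mul (Int.emod_emod_of_dvd x dvd_rfl) (Int.ModEq.refl a)

-- A's recursive PowMod computes a^n mod m (for m > 0, n >= 0)
theorem pyPowMod_closed (m : Int) (hm : 0 < m) :
    ∀ (fuel : Nat) (a n : Int), 0 ≤ n → n.toNat ≤ fuel → pyPowMod a n m = a ^ n.toNat % m := by
  intro fuel
  induction fuel with
  | zero =>
    intro a n hn hf
    have h0 : n = 0 := by omega
    subst h0
    rw [pyPowMod]
    simp [PySem.Int.mod_eq_emod_of_pos hm]
  | succ f ih =>
    intro a n hn hf
    by_cases h0 : n ≤ 0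
    · have : n = 0 := by omega
      subst this
      rw [pyPowMod]
      simp [PySem.Int.mod_eq_emod_of_pos hm]
    · by_cases h1 : n = 1
      · subst h1
        rw [pyPowMod]
        simp [PySem.Int.mod_eq_emod_of_pos hm]
      · have hn2 : 2 ≤ n := by omega
        rw [pyPowMod]
        simp only [dif_neg h0, if_neg h1]
        rw [PySem.Int.floordiv_eq_ediv_of_pos (by omega : (0:Int) < 2)]
        rw [ih a (n / 2) (by omega) (by omega)]
        simp only [PySem.Int.mod_eq_emod_of_pos hm,
          PySem.Int.mod_eq_emod_of_pos (by omega : (0:Int) < 2)]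
        by_cases he : n % 2 = 0
        · simp only [if_pos he]
          rw [sq_emod, ← pow_add]
          have hexp : (n / 2).toNat + (n / 2).toNat = n.toNat := by omega
          rw [hexp]
        · simp only [if_neg he]
          rw [sq_emod, emod_mul_emod_left, ← pow_add, ← pow_succ]
          have hexp : (n / 2).toNat + (n / 2).toNat + 1 = n.toNat := by omega
          rw [hexp]

-- B's square-and-multiply loop: invariant result * base^e (for m > 0, e ≥ 0, result reduced)
theorem bPowLoop_closed (m : Int) (hm : 0 < m) :
    ∀ (fuel : Nat) (r b e : Int), 0 ≤ e → e.toNat ≤ fuel → r % m = r →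
      bPowLoop m r b e = r * b ^ e.toNat % m := by
  intro fuel
  induction fuel with
  | zero =>
    intro r b e he hf hr
    have h0 : e = 0 := by omega
    subst h0
    rw [bPowLoop]
    simpa using hr.symm
  | succ f ih =>
    intro r b e he hf hr
    by_cases h0 : e > 0
    · rw [bPowLoop]
      simp only [dif_pos h0]
      rw [PySem.Int.floordiv_eq_ediv_of_pos (by omega : (0:Int) < 2)]
      simp only [PySem.Int.mod_eq_emod_of_pos hm,
        PySem.Int.mod_eq_emod_of_pos (by omega : (0:Int) < 2)]
      set k := (e / 2).toNat with hk
      have hek : e.toNat = k + k + (e % 2).toNat := by omega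
      by_cases hodd : e % 2 = 1
      · simp only [if_pos hodd]
        rw [ih (r * b % m) (b * b % m) (e / 2) (by omega) (by omega)
              (Int.emod_emod_of_dvd _ dvd_rfl)]
        rw [mulpow_emod]
        conv_rhs => rw [← hr]
        rw [Int.ModEq.mul (Int.emod_emod_of_dvd r dvd_rfl)
              (Int.ModEq.refl (b ^ e.toNat)) ]
        congr 1
        simp only [hek, hodd, Int.toNat_one]
        rw [mul_pow, pow_add, pow_succ]
        ring
      · simp only [if_neg hodd]
        have he0 : e % 2 = 0 := by omega
        rw [ih r (b * b % m) (e / 2) (by omega) (by omega) hr]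
        conv_lhs => rw [← hr]
        rw [mulpow_emod]
        conv_rhs => rw [← hr]
        rw [Int.ModEq.mul (Int.emod_emod_of_dvd r dvd_rfl)
              (Int.ModEq.refl (b ^ e.toNat))]
        congr 1
        simp only [hek, he0, Int.toNat_zero, Nat.add_zero]
        rw [mul_pow, pow_add]
    · rw [bPowLoop]
      have h0e : e = 0 := by omega
      subst h0e
      simpa using hr.symm

-- the two PowMods agree (for m > 0, n ≥ 0)
theorem powMod_eq (a n m : Int) (hm : 0 < m) (hn : 0 ≤ n) :
    pyPowMod a n m = bPowMod a n m := by
  rw [pyPowMod_closed m hm n.toNat a n hn le_rfl]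
  rw [bPowMod, bPowLoop_closed m hm n.toNat _ _ n hn le_rfl
        (by rw [PySem.Int.mod_eq_emod_of_pos hm]; exact Int.emod_emod_of_dvd _ dvd_rfl)]
  rw [PySem.Int.mod_eq_emod_of_pos hm, PySem.Int.mod_eq_emod_of_pos hm, mulpow_emod, one_mul]

-- A's ConvertToStr loop only ever appends to its accumulator
theorem aConvLoop_append : ∀ (fuel : Nat) (n : Int) (res : List Char),
    n.toNat ≤ fuel → pyConvertToStrLoop n res = res ++ pyConvertToStrLoop n [] := by
  intro fuel
  induction fuel with
  | zero =>
    intro n res hf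
    simp [pyConvertToStrLoop, show ¬ n > 0 by omega]
  | succ f ih =>
    intro n res hf
    by_cases h0 : n > 0
    · rw [pyConvertToStrLoop]
      conv_rhs => rw [pyConvertToStrLoop]
      simp only [dif_pos h0]
      have hd : (PySem.Int.floordiv n 256).toNat ≤ f := by
        rw [PySem.Int.floordiv_eq_ediv_of_pos (by omega)]
        omega
      rw [ih _ _ hd, ih _ ([] ++ _) hd]
      simp
    · simp [pyConvertToStrLoop, h0]

-- B's ConvertToStr loop only ever prepends to its accumulator
theorem bConvLoop_prepend : ∀ (fuel : Nat) (n : Int) (res : List Char),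
    n.toNat ≤ fuel → bConvLoop n res = bConvLoop n [] ++ res := by
  intro fuel
  induction fuel with
  | zero =>
    intro n res hf
    simp [bConvLoop, show ¬ n > 0 by omega]
  | succ f ih =>
    intro n res hf
    by_cases h0 : n > 0
    · rw [bConvLoop]
      conv_rhs => rw [bConvLoop]
      simp only [dif_pos h0]
      have hd : (PySem.Int.floordiv n 256).toNat ≤ f := by
        rw [PySem.Int.floordiv_eq_ediv_of_pos (by omega)]
        omega
      rw [ih _ _ hd, ih _ (_ :: []) hd]
      simp
    · simp [bConvLoop, h0]

-- B builds most-significant-first what A builds least-significant-first and reverses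
theorem bConvLoop_eq_reverse : ∀ (fuel : Nat) (n : Int),
    n.toNat ≤ fuel → bConvLoop n [] = (pyConvertToStrLoop n []).reverse := by
  intro fuel
  induction fuel with
  | zero =>
    intro n hf
    rw [bConvLoop, pyConvertToStrLoop]
    simp [show ¬ n > 0 by omega]
  | succ f ih =>
    intro n hf
    by_cases h0 : n > 0
    · rw [bConvLoop, pyConvertToStrLoop]
      simp only [dif_pos h0]
      have hd : (PySem.Int.floordiv n 256).toNat ≤ f := by
        rw [PySem.Int.floordiv_eq_ediv_of_pos (by omega)]
        omega
      rw [bConvLoop_prepend f _ _ hd, aConvLoop_append f _ _ hd, ih _ hd]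
      simp
    · rw [bConvLoop, pyConvertToStrLoop]
      simp [h0]

theorem convertToStr_eq (n : Int) : pyConvertToStr n = bConvertToStr n := by
  rw [pyConvertToStr, bConvertToStr, bConvLoop_eq_reverse n.toNat n le_rfl]

-- B's iterative extended-Euclid loop in terms of A's recursive one
theorem bInvLoop_closed : ∀ (fuel : Nat) (a r os s : Int), r.natAbs ≤ fuel →
    bInvLoop a r os s = os * (pyExtendedEuclid a r).1 + s * (pyExtendedEuclid a r).2 := by
  intro fuel
  induction fuel with
  | zero =>
    intro a r os s hf
    have h0 : r = 0 := by omega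
    subst h0
    rw [bInvLoop, pyExtendedEuclid]
    simp
  | succ f ih =>
    intro a r os s hf
    by_cases h0 : r = 0
    · subst h0
      rw [bInvLoop, pyExtendedEuclid]
      simp
    · rw [bInvLoop]
      simp only [dif_pos h0]
      have hlt := bInv_step_natAbs_lt a r h0
      rw [ih r (a - PySem.Int.floordiv a r * r) s (os - PySem.Int.floordiv a r * s) (by omega)]
      conv_rhs => rw [pyExtendedEuclid]
      simp only [dif_neg h0]
      have hmod : a - PySem.Int.floordiv a r * r = PySem.Int.mod a r := by
        have := PySem.Int.floordiv_mul_add_mod a r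
        omega
      rw [hmod]
      ring

-- the two InvertModulos agree (everywhere)
theorem invertModulo_eq (a n : Int) : pyInvertModulo a n = bInvertModulo a n := by
  rw [pyInvertModulo, bInvertModulo, bInvLoop_closed n.natAbs a n 1 0 le_rfl]
  simp

-- with n ≥ 0 the inverse A computes is nonnegative (this is the exponent fed to PowMod)
theorem pyInvertModulo_nonneg (a n : Int) (hn : 0 ≤ n) : 0 ≤ pyInvertModulo a n := by
  rw [pyInvertModulo]
  by_cases hneg : (pyExtendedEuclid a n).1 < 0
  · have hn0 : n ≠ 0 := by
      intro h0
      subst h0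
      rw [pyExtendedEuclid] at hneg
      simp at hneg
    have hpos : 0 < n := by omega
    simp only [if_pos hneg]
    exact PySem.Int.mod_nonneg _ hpos
  · simp only [if_neg hneg]
    omega

-- the two Decrypts agree for p ≥ 2, q ≥ 1 (every Decrypt call the search makes)
theorem decrypt_eq (c p q e : Int) (hp : 2 ≤ p) (hq : 1 ≤ q) :
    pyDecrypt c p q e = bDecrypt c p q e := by
  rw [pyDecrypt, bDecrypt]
  have hn : (0:Int) ≤ (p - 1) * (q - 1) := mul_nonneg (by omega) (by omega)
  rw [← invertModulo_eq]
  rw [← powMod_eq c _ (p * q) (mul_pos (by omega) (by omega)) (pyInvertModulo_nonneg _ _ hn)]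
  exact convertToStr_eq _

-- if modulo % num ≠ 0, A's inner loop can only break or fall through: no return
theorem aInner_not_dvd (c m e num : Int) (h : PySem.Int.mod m num ≠ 0) :
    ∀ is : List Int, aInner c m e num is = none := by
  intro is
  induction is with
  | nil => rfl
  | cons i is ih => simp [aInner, h, ih]

-- even num never returns: i = 2 breaks at once (or the range is empty for num = 2)
theorem aInner_even (c m e num : Int) (h2 : 2 ≤ num) (heven : PySem.Int.mod num 2 = 0) :
    aInner c m e num (PySem.List.pyRange 2 num 1) = none := by
  have heven' : num % 2 = 0 := by
    rwa [PySem.Int.mod_eq_emod_of_pos (by omega)] at heven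
  rcases eq_or_lt_of_le h2 with h | h
  · rw [← h, PySem.List.pyRange_one_eq_nil (by omega)]
    rfl
  · rw [PySem.List.pyRange_one_cons h]
    simp [aInner, heven']

-- odd num ≥ 3 dividing modulo returns Decrypt at i = 2
theorem aInner_odd_dvd (c m e num : Int) (h3 : 3 ≤ num) (hodd : PySem.Int.mod num 2 = 1)
    (hdvd : PySem.Int.mod m num = 0) :
    aInner c m e num (PySem.List.pyRange 2 num 1)
      = some (pyDecrypt c num (PySem.Int.floordiv m num) e) := by
  have hodd' : num % 2 = 1 := by
    rwa [PySem.Int.mod_eq_emod_of_pos (by omega)] at hodd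
  rw [PySem.List.pyRange_one_cons (by omega)]
  simp [aInner, hodd', hdvd]

theorem mod_two_succ (s : Int) (h : PySem.Int.mod s 2 = 1) : PySem.Int.mod (s + 1) 2 = 0 := by
  rw [PySem.Int.mod_eq_emod_of_pos (by omega)] at h ⊢
  omega

theorem mod_two_succ_succ (s : Int) (h : PySem.Int.mod s 2 = 1) : PySem.Int.mod (s + 2) 2 = 1 := by
  rw [PySem.Int.mod_eq_emod_of_pos (by omega)] at h ⊢
  omega

-- the quotient handed to Decrypt is ≥ 1 once num divides modulo ≥ 1
theorem quot_ge_one (m num : Int) (hm : 1 ≤ m) (h3 : 3 ≤ num)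
    (hdvd : PySem.Int.mod m num = 0) : 1 ≤ PySem.Int.floordiv m num := by
  rw [PySem.Int.le_floordiv_iff_mul_le (by omega)]
  have : num ∣ m := (PySem.Int.mod_eq_zero_iff_dvd m num).mp hdvd
  have := Int.le_of_dvd (by omega) this
  omega

-- A's remaining outer loop from an odd start s equals B's while-loop from s
theorem aOuter_eq_bSearch (c m e : Int) (hm : 1 ≤ m) : ∀ (fuel : Nat) (s : Int),
    PySem.Int.mod s 2 = 1 → 3 ≤ s → (1000000 - s).toNat ≤ fuel →
    aOuter c m e (PySem.List.pyRange s 1000000 1) = bSearch c m e s := by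
  intro fuel
  induction fuel with
  | zero =>
    intro s _ _ hf
    have hs : (1000000 : Int) ≤ s := by omega
    rw [PySem.List.pyRange_one_eq_nil hs, bSearch]
    simp [aOuter, show ¬ s < 1000000 by omega]
  | succ f ih =>
    intro s hodd h3 hf
    by_cases hs : s < 1000000
    · rw [PySem.List.pyRange_one_cons hs, bSearch]
      by_cases hdvd : PySem.Int.mod m s = 0
      · simp only [aOuter, aInner_odd_dvd c m e s h3 hodd hdvd, dif_pos hs, if_pos hdvd]
        exact decrypt_eq c s _ e (by omega) (quot_ge_one m s hm h3 hdvd)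
      · have h1 : aInner c m e s (PySem.List.pyRange 2 s 1) = none := aInner_not_dvd c m e s hdvd _
        simp only [aOuter, h1, dif_pos hs, if_neg hdvd]
        by_cases hs1 : s + 1 < 1000000
        · rw [PySem.List.pyRange_one_cons hs1]
          have h2 : aInner c m e (s + 1) (PySem.List.pyRange 2 (s + 1) 1) = none :=
            aInner_even c m e (s + 1) (by omega) (mod_two_succ s hodd)
          simp only [aOuter, h2]
          rw [show s + 1 + 1 = s + 2 by ring]
          exact ih (s + 2) (mod_two_succ_succ s hodd) (by omega) (by omega)
        · rw [PySem.List.pyRange_one_eq_nil (by omega), bSearch]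
          simp [aOuter, show ¬ s + 2 < 1000000 by omega]
    · rw [PySem.List.pyRange_one_eq_nil (by omega), bSearch]
      simp [aOuter, show ¬ s < 1000000 by omega]

-- ===== VERDICT (by name: the statement is the Claim_ definition above) =====
theorem DecipherSmallPrime_spec : Claim_equal_DecipherSmallPrime := by
  unfold Claim_equal_DecipherSmallPrime
  intro c m e _ hm
  unfold Pre_DecipherSmallPrime at hm
  unfold Spec_DecipherSmallPrime DecipherSmallPrime DecipherSmallPrime_alt
  rw [PySem.List.pyRange_one_cons (by omega)]
  have h2 : aInner c m e 2 (PySem.List.pyRange 2 2 1) = none := by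
    rw [PySem.List.pyRange_one_eq_nil (by omega)]; rfl
  simp only [aOuter, h2]
  exact aOuter_eq_bSearch c m e hm 1000000 3 (by decide) (by omega) (by omega)
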